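-- pv_equiv track=rewrite | github.com/muffin-rice/splittable-benchmarking | src/utils2.py | partition_objects_into_threads
-- ===== SOURCE A (Python) =====
-- def partition_objects_into_threads(detection_keys : [int], max_threads : int, min_objects : int) -> [[int]]:
--     threads = []
--     if len(detection_keys) > max_threads * min_objects:
--         objects_per_thread = len(detection_keys) // max_threads
--         remaining_objects = objects_per_thread + len(detection_keys) % max_threads
--
--         threads.append(detection_keys[:remaining_objects])
--         detection_keys = detection_keys[remaining_objects:]
--         for i in range(max_threads - 1):
--             threads.append(detection_keys[:objects_per_thread])
--             detection_keys = detection_keys[objects_per_thread:]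
--
--     else:
--         while len(detection_keys) > min_objects:
--             threads.append(detection_keys[:min_objects])
--             detection_keys = detection_keys[min_objects:]
--         else:
--             if len(detection_keys) > 0:
--                 threads.append(detection_keys)
--                 detection_keys = []
--
--     return threads
-- ===== SOURCE B (Python) =====
-- def partition_objects_into_threads(detection_keys, max_threads, min_objects):
--     # compute chunk sizes up front, then cut the list once per chunk by index offsets
--     n = len(detection_keys)
--     if n > max_threads * min_objects:
--         q, r = divmod(n, max_threads)
--         sizes = [q + r] + [q] * (max_threads - 1)
--     elif detection_keys:
--         q, r = divmod(n, min_objects)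
--         sizes = [min_objects] * q + ([r] if r else [])
--     else:
--         sizes = []
--     out = []
--     i = 0
--     for s in sizes:
--         out.append(detection_keys[i:i + s])
--         i += s
--     return out
-- ===== Notes on version B (the rewrite author's own statement) =====
-- stated objective: alternative
-- what changed: B computes the list of chunk sizes in closed form (one divmod per branch) and cuts the original list with one index-offset slice per chunk, replacing A's repeated re-slicing of the shrinking tail and its while-loop with a single fold.
import Mathlib
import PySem

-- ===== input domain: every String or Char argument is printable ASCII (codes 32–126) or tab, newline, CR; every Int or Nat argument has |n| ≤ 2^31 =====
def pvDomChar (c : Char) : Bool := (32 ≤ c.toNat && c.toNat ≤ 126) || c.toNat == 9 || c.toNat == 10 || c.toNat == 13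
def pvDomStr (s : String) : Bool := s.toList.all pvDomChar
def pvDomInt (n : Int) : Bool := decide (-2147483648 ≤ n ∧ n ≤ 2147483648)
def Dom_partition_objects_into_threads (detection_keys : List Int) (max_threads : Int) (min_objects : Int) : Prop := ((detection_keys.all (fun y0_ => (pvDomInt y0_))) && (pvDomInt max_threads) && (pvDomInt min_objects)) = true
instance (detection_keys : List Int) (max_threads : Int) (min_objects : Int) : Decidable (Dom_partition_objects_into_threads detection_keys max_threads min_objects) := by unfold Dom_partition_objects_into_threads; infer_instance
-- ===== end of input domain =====

-- ===== PORT A =====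
-- B replaces A's repeated tail re-slicing by closed-form chunk sizes + one offset slice per chunk (alternative single-pass decomposition).
-- A mutates only its local rebinding of detection_keys; the caller's list is not mutated.

-- the `for i in range(max_threads-1)` loop body of A
def pvAStep (q : Int) (st : List (List Int) × List Int) (_ : Int) : List (List Int) × List Int :=
  (st.1 ++ [PySem.List.slice st.2 none (some q)], PySem.List.slice st.2 (some q) none)

-- A's `while len(detection_keys) > min_objects: … else: …` loop, fuel-bounded
-- (fuel length+1 suffices whenever the Python loop terminates; Python diverges exactly outside Pre_)
def pvAWhile (fuel : Nat) (keys : List Int) (mo : Int) (acc : List (List Int)) : List (List Int) :=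
  match fuel with
  | 0 => acc
  | f + 1 =>
    if (keys.length : Int) > mo then
      pvAWhile f (PySem.List.slice keys (some mo) none) mo
        (acc ++ [PySem.List.slice keys none (some mo)])
    else
      if (keys.length : Int) > 0 then acc ++ [keys] else acc

def partition_objects_into_threads (detection_keys : List Int) (max_threads : Int) (min_objects : Int) : List (List Int) :=
  if (detection_keys.length : Int) > max_threads * min_objects then
    let opt := PySem.Int.floordiv (detection_keys.length : Int) max_threads
    let rem := opt + PySem.Int.mod (detection_keys.length : Int) max_threads
    ((PySem.List.pyRange 0 (max_threads - 1) 1).foldl (pvAStep opt)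
        ([PySem.List.slice detection_keys none (some rem)],
         PySem.List.slice detection_keys (some rem) none)).1
  else
    pvAWhile (detection_keys.length + 1) detection_keys min_objects []

-- ===== PORT B =====
-- Source B's chunk-size computation; Python's `[x]*k` with possibly negative k is List.replicate k.toNat ([] for k ≤ 0)
def pvSizes (detection_keys : List Int) (max_threads : Int) (min_objects : Int) : List Int :=
  let n : Int := detection_keys.length
  if n > max_threads * min_objects then
    (PySem.Int.floordiv n max_threads + PySem.Int.mod n max_threads)
      :: List.replicate (max_threads - 1).toNat (PySem.Int.floordiv n max_threads)
  else if detection_keys ≠ [] then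
    List.replicate (PySem.Int.floordiv n min_objects).toNat min_objects
      ++ (if PySem.Int.mod n min_objects ≠ 0 then [PySem.Int.mod n min_objects] else [])
  else []

-- Source B's output loop body: slice the original list at the running offset
def pvChunkStep (keys : List Int) (st : List (List Int) × Int) (s : Int) : List (List Int) × Int :=
  (st.1 ++ [PySem.List.slice keys (some st.2) (some (st.2 + s))], st.2 + s)

def partition_objects_into_threads_alt (detection_keys : List Int) (max_threads : Int) (min_objects : Int) : List (List Int) :=
  ((pvSizes detection_keys max_threads min_objects).foldl (pvChunkStep detection_keys) ([], 0)).1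

-- ===== PRECONDITION & SPEC =====
-- Pre_ excludes exactly the inputs where A does not return: max_threads = 0 with a nonempty list
-- (ZeroDivisionError) and min_objects < 0 with len ≤ max_threads*min_objects (A's while-loop diverges).
def Pre_partition_objects_into_threads (detection_keys : List Int) (max_threads : Int) (min_objects : Int) : Prop :=
  ¬(max_threads = 0 ∧ 0 < (detection_keys.length : Int)) ∧
  ¬(min_objects < 0 ∧ (detection_keys.length : Int) ≤ max_threads * min_objects)
instance (detection_keys : List Int) (max_threads : Int) (min_objects : Int) : Decidable (Pre_partition_objects_into_threads detection_keys max_threads min_objects) := by unfold Pre_partition_objects_into_threads; infer_instance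

def pvWitness_partition_objects_into_threads : List Int × Int × Int := ([1, 2, 3], 2, 1)

def Spec_partition_objects_into_threads (detection_keys : List Int) (max_threads : Int) (min_objects : Int) (out : List (List Int)) : Prop := out = partition_objects_into_threads_alt detection_keys max_threads min_objects
instance (detection_keys : List Int) (max_threads : Int) (min_objects : Int) (out : List (List Int)) : Decidable (Spec_partition_objects_into_threads detection_keys max_threads min_objects out) := by unfold Spec_partition_objects_into_threads; infer_instance

-- ===== CLAIM (what is proved, stated in full; the proofs are below) =====
def Claim_equal_partition_objects_into_threads : Prop := ∀ (detection_keys : List Int) (max_threads : Int) (min_objects : Int), Dom_partition_objects_into_threads detection_keys max_threads min_objects → Pre_partition_objects_into_threads detection_keys max_threads min_objects → Spec_partition_objects_into_threads detection_keys max_threads min_objects (partition_objects_into_threads detection_keys max_threads min_objects)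

-- ===== LEMMAS AND PROOFS =====

-- A's for-loop (repeated take/drop of the shrinking tail, one step per range element)
-- equals B's offset-slice fold over the corresponding list of equal sizes.
lemma pvFor_eq_fold (keys : List Int) (q : Int) (hq : 0 ≤ q) :
    ∀ (l : List Int) (i : Nat) (acc : List (List Int)),
      ((l.foldl (pvAStep q) (acc, keys.drop i)).1)
        = ((List.replicate l.length q).foldl (pvChunkStep keys) (acc, (i : Int))).1 := by
  obtain ⟨qn, rfl⟩ : ∃ qn : Nat, q = (qn : Int) := ⟨q.toNat, (Int.toNat_of_nonneg hq).symm⟩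
  intro l
  induction l with
  | nil => intro i acc; simp
  | cons x l ih =>
    intro i acc
    simp only [List.foldl_cons, List.length_cons, List.replicate_succ, pvAStep, pvChunkStep]
    rw [PySem.List.slice_to_natCast, PySem.List.slice_from_natCast,
        PySem.List.slice_natCast_add]
    rw [List.drop_drop]
    have h1 : (i : Int) + (qn : Int) = ((i + qn : Nat) : Int) := by push_cast; ring
    rw [h1, ih (i + qn)]

-- A's while-loop (with enough fuel) equals B's offset-slice fold over
-- `replicate c mo ++ leftover`, given the length bookkeeping.
lemma pvWhile_eq_fold (keys : List Int) (m : Nat) (hm1 : 1 ≤ m) (rr : Nat) (hrr : rr < m) :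
    ∀ (c : Nat) (i : Nat) (acc : List (List Int)) (fuel : Nat),
      (keys.drop i).length = c * m + rr → c + 1 ≤ fuel →
      pvAWhile fuel (keys.drop i) (m : Int) acc
        = ((List.replicate c ((m : Nat) : Int)
              ++ (if rr ≠ 0 then [((rr : Nat) : Int)] else [])).foldl
             (pvChunkStep keys) (acc, (i : Int))).1 := by
  intro c
  induction c with
  | zero =>
    intro i acc fuel hlen hfuel
    obtain ⟨f, rfl⟩ : ∃ f, fuel = f + 1 := ⟨fuel - 1, by omega⟩
    simp only [Nat.zero_mul, Nat.zero_add] at hlen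
    simp only [pvAWhile]
    rw [if_neg (by rw [hlen]; exact_mod_cast Nat.not_lt.mpr (Nat.le_of_lt hrr))]
    by_cases h0 : rr = 0
    · subst h0
      rw [if_neg (by rw [hlen]; simp)]
      simp
    · rw [if_pos (by rw [hlen]; exact_mod_cast Nat.pos_of_ne_zero h0)]
      simp only [List.replicate_zero, List.nil_append, if_pos h0, List.foldl_cons,
        List.foldl_nil, pvChunkStep]
      rw [PySem.List.slice_natCast_add]
      rw [List.take_of_length_le (by omega)]
  | succ c ih =>
    intro i acc fuel hlen hfuel
    obtain ⟨f, rfl⟩ : ∃ f, fuel = f + 1 := ⟨fuel - 1, by omega⟩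
    simp only [pvAWhile]
    by_cases hgt : ((keys.drop i).length : Int) > (m : Int)
    · rw [if_pos hgt]
      rw [PySem.List.slice_to_natCast, PySem.List.slice_from_natCast, List.drop_drop]
      simp only [List.replicate_succ, List.cons_append, List.foldl_cons, pvChunkStep]
      rw [PySem.List.slice_natCast_add]
      have h1 : (i : Int) + (m : Int) = ((i + m : Nat) : Int) := by push_cast; ring
      rw [h1]
      refine ih (i + m) _ f ?_ (by omega)
      have hmul : (c + 1) * m = c * m + m := by ring
      simp only [List.length_drop] at hlen ⊢
      omega
    · rw [if_neg hgt]
      have hm : (keys.drop i).length ≤ m := by exact_mod_cast Int.not_lt.mp hgt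
      have hc : c = 0 ∧ rr = 0 := by constructor <;> nlinarith [hlen, hm, hm1]
      obtain ⟨rfl, rfl⟩ := hc
      rw [if_pos (by rw [hlen]; exact_mod_cast Nat.lt_of_lt_of_le Nat.zero_lt_one (by omega : 1 ≤ 1 * m + 0))]
      simp only [List.replicate_succ, List.replicate_zero, if_neg (by simp : ¬(0 : Nat) ≠ 0),
        List.append_nil, List.foldl_cons, List.foldl_nil, pvChunkStep]
      rw [PySem.List.slice_natCast_add]
      rw [List.take_of_length_le (by omega)]


-- ===== VERDICT (by name: the statement is the Claim_ definition above) =====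
theorem partition_objects_into_threads_spec : Claim_equal_partition_objects_into_threads := by
  intro keys mt mo hdom hpre
  unfold Spec_partition_objects_into_threads
  unfold partition_objects_into_threads partition_objects_into_threads_alt pvSizes
  by_cases h : ((keys.length : Int) > mt * mo)
  · simp only [if_pos h]
    set q := PySem.Int.floordiv (keys.length : Int) mt with hqdef
    set r := PySem.Int.mod (keys.length : Int) mt with hrdef
    by_cases hmt : 0 < mt
    · have hq : 0 ≤ q := by
        rw [hqdef, PySem.Int.floordiv_eq_ediv_of_pos hmt]
        exact Int.ediv_nonneg (by positivity) hmt.le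
      have hr : 0 ≤ r := PySem.Int.mod_nonneg _ hmt
      have hrem : 0 ≤ q + r := by omega
      rw [PySem.List.slice_from _ hrem]
      have hfold := pvFor_eq_fold keys q hq (PySem.List.pyRange 0 (mt - 1) 1)
        (q + r).toNat [PySem.List.slice keys none (some (q + r))]
      rw [hfold]
      simp only [List.foldl_cons, pvChunkStep, List.nil_append, zero_add,
        PySem.List.slice_zero_start, PySem.List.length_pyRange_one,
        Int.toNat_of_nonneg hrem, sub_zero]
    · have hmt0 : mt ≠ 0 := by
        rintro rfl
        exact hpre.1 ⟨rfl, by simpa using h⟩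
      have hneg : (mt - 1).toNat = 0 := by omega
      rw [PySem.List.pyRange_one]
      simp only [hneg, Int.toNat_of_nonpos (by omega : mt - 1 - 0 ≤ 0),
        List.range_zero, List.map_nil, List.replicate_zero, List.foldl_nil,
        List.foldl_cons, pvChunkStep, List.nil_append, zero_add,
        PySem.List.slice_zero_start]
  · simp only [if_neg h]
    by_cases hk : keys = []
    · subst hk
      have hmo : 0 ≤ mo := by
        by_contra hneg
        exact hpre.2 ⟨by omega, by simpa using h⟩
      simp only [List.length_nil, List.nil_append, ne_eq, not_true_eq_false, if_false,
        List.foldl_nil, pvAWhile]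
      rw [if_neg (by exact_mod_cast not_lt.mpr (by simpa using hmo)), if_neg (by simp)]
    · have hn : 0 < (keys.length : Int) := by
        have := List.length_pos_iff.mpr hk
        exact_mod_cast this
      have hmo : 0 < mo := by
        rcases lt_trichotomy mo 0 with hlt | rfl | hgt
        · exact absurd ⟨hlt, not_lt.mp h⟩ hpre.2
        · exfalso
          simp only [mul_zero, gt_iff_lt, not_lt] at h
          omega
        · exact hgt
      obtain ⟨m, rfl⟩ : ∃ m : Nat, mo = (m : Int) := ⟨mo.toNat, (Int.toNat_of_nonneg hmo.le).symm⟩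
      set r := PySem.Int.mod (keys.length : Int) (m : Int) with hrdef
      set q := PySem.Int.floordiv (keys.length : Int) (m : Int) with hqdef
      have hr0 : 0 ≤ r := PySem.Int.mod_nonneg _ hmo
      have hrlt : r < (m : Int) := PySem.Int.mod_lt _ hmo
      have hq : 0 ≤ q := by
        rw [hqdef, PySem.Int.floordiv_eq_ediv_of_pos hmo]
        exact Int.ediv_nonneg (by positivity) hmo.le
      obtain ⟨c, hc⟩ : ∃ c : Nat, q = (c : Int) := ⟨q.toNat, (Int.toNat_of_nonneg hq).symm⟩
      obtain ⟨rr, hrr⟩ : ∃ rr : Nat, r = (rr : Int) := ⟨r.toNat, (Int.toNat_of_nonneg hr0).symm⟩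
      have hsum := PySem.Int.floordiv_mul_add_mod (keys.length : Int) (m : Int)
      rw [← hqdef, ← hrdef, hc, hrr] at hsum
      have hlen : keys.length = c * m + rr := by exact_mod_cast hsum.symm
      have hm1 : 1 ≤ m := by omega
      have hw := pvWhile_eq_fold keys m hm1 rr (by exact_mod_cast hrr ▸ hrlt) c 0 [] (keys.length + 1)
        (by simpa using hlen)
        (by have := Nat.le_mul_of_pos_right c (by omega : 0 < m); omega)
      simp only [List.drop_zero] at hw
      rw [hw]
      simp only [hc, hrr, Int.toNat_natCast, ne_eq, Nat.cast_eq_zero, Nat.cast_zero]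
      rw [if_pos hk]
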